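-- pv_equiv track=rewrite | github.com/ksabhinav/projectfiner | public/slbc-data/extract_kerala.py | is_district_row
-- ===== SOURCE A (Python) =====
-- KERALA_DISTRICTS = [
--     "TRIVANDRUM", "KOLLAM", "PATHANAMTHITTA", "ALAPPUZHA", "KOTTAYAM",
--     "IDUKKI", "ERNAKULAM", "THRISSUR", "PALAKKAD", "MALAPPURAM",
--     "KOZHIKODE", "WAYANAD", "KANNUR", "KASARGOD"
-- ]
--
-- def is_district_row(row):
--     """Check if a table row contains a district name."""
--     if not row or len(row) < 2:
--         return False
--     for cell in row[:3]:
--         if cell: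
--             cell_upper = cell.strip().upper()
--             for d in KERALA_DISTRICTS:
--                 if d in cell_upper:
--                     return True
--     return False
-- ===== SOURCE B (Python) =====
-- KERALA_DISTRICTS = [
--     "TRIVANDRUM", "KOLLAM", "PATHANAMTHITTA", "ALAPPUZHA", "KOTTAYAM",
--     "IDUKKI", "ERNAKULAM", "THRISSUR", "PALAKKAD", "MALAPPURAM",
--     "KOZHIKODE", "WAYANAD", "KANNUR", "KASARGOD"
-- ]
--
-- # first-letter index: initial character -> district names starting with it
-- _BY_FIRST = {}
-- for _d in KERALA_DISTRICTS:
--     _BY_FIRST.setdefault(_d[0], []).append(_d)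
--
--
-- def is_district_row(row):
--     """Check if a table row contains a district name."""
--     if not row or len(row) < 2:
--         return False
--     for cell in row[:3]:
--         if cell:
--             text = cell.strip().upper()
--             for i in range(len(text)):
--                 for d in _BY_FIRST.get(text[i], []):
--                     if text.startswith(d, i):
--                         return True
--     return False
-- ===== Notes on version B (the rewrite author's own statement) =====
-- stated objective: alternative
-- what changed: B replaces A's inner loop of 14 per-district substring scans with one left-to-right position scan of each cell that consults a first-letter index (a dict from initial character to the district names starting with it, built once) and runs startswith only for those few candidates at the current position.
import Mathlib
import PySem

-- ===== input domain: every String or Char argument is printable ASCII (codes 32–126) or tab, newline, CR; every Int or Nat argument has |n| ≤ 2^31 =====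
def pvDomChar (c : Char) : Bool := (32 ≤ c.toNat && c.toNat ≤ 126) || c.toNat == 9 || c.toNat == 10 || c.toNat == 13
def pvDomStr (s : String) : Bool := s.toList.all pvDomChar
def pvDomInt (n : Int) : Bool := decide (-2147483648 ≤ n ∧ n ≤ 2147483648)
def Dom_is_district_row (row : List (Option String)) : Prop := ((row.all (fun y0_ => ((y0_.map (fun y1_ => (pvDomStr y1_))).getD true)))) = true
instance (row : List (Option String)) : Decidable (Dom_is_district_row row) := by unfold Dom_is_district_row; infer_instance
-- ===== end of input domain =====

-- B scans each cell position by position, consulting a first-letter index (initial char ->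
-- district names) and testing only those candidates with startswith, instead of A's inner
-- loop of 14 per-district substring scans (objective: alternative).

def KERALA_DISTRICTS : List String :=
  ["TRIVANDRUM", "KOLLAM", "PATHANAMTHITTA", "ALAPPUZHA", "KOTTAYAM",
   "IDUKKI", "ERNAKULAM", "THRISSUR", "PALAKKAD", "MALAPPURAM",
   "KOZHIKODE", "WAYANAD", "KANNUR", "KASARGOD"]

-- ===== PORT A =====
-- inner loop: 'for d in KERALA_DISTRICTS: if d in cell_upper: return True'
def checkDistricts : List String → String → Bool
  | [], _ => false
  | d :: ds, cu => if PySem.Str.isIn d cu then true else checkDistricts ds cu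

-- outer loop: 'for cell in row[:3]: if cell: …'
def loopCells : List (Option String) → Bool
  | [] => false
  | c :: rest =>
    match c with
    | some s =>
      if s ≠ "" then
        if checkDistricts KERALA_DISTRICTS (PySem.Str.upper (PySem.Str.strip s)) then true
        else loopCells rest
      else loopCells rest
    | none => loopCells rest

def is_district_row (row : List (Option String)) : Bool :=
  if row.isEmpty || decide (row.length < 2) then false
  else loopCells (PySem.List.slice row none (some 3))

-- ===== PORT B =====
-- module-level build loop: '_BY_FIRST.setdefault(_d[0], []).append(_d)'
def BY_FIRST : PySem.Dict Char (List String) :=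
  KERALA_DISTRICTS.foldl
    (fun acc d =>
      match d.toList with
      | [] => acc            -- unreachable: every district name is nonempty
      | c :: _ => acc.modify c [] (· ++ [d]))
    PySem.Dict.empty

-- 'for d in _BY_FIRST.get(text[i], []): if text.startswith(d, i): return True'
-- (the suffix l is text dropped to position i, so startswith(d, i) is startswith on l)
def checkBucket : List String → List Char → Bool
  | [], _ => false
  | d :: ds, l => if PySem.Chars.startswith l d.toList then true else checkBucket ds l

-- 'for i in range(len(text)): …' as structural recursion over the suffixes of text
def scanText : List Char → Bool
  | [] => false
  | c :: rest =>
    if checkBucket (BY_FIRST.getD c []) (c :: rest) then true else scanText rest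

def loopCellsB : List (Option String) → Bool
  | [] => false
  | c :: rest =>
    match c with
    | some s =>
      if s ≠ "" then
        if scanText (PySem.Str.upper (PySem.Str.strip s)).toList then true
        else loopCellsB rest
      else loopCellsB rest
    | none => loopCellsB rest

def is_district_row_alt (row : List (Option String)) : Bool :=
  if row.isEmpty || decide (row.length < 2) then false
  else loopCellsB (PySem.List.slice row none (some 3))

-- ===== PRECONDITION & SPEC =====
def Spec_is_district_row (row : List (Option String)) (out : Bool) : Prop := out = is_district_row_alt row
instance (row : List (Option String)) (out : Bool) : Decidable (Spec_is_district_row row out) := by unfold Spec_is_district_row; infer_instance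

-- ===== CLAIM (what is proved, stated in full; the proofs are below) =====
def Claim_equal_is_district_row : Prop := ∀ (row : List (Option String)), Dom_is_district_row row → Spec_is_district_row row (is_district_row row)

-- ===== LEMMAS AND PROOFS =====

-- the index's buckets hold exactly the districts, keyed by their first letter (finite facts)
lemma bucket_items : ∀ p ∈ BY_FIRST.items, ∀ d ∈ p.2,
    d ∈ KERALA_DISTRICTS ∧ d.toList.head? = some p.1 := by decide

lemma bucket_mem : ∀ d ∈ KERALA_DISTRICTS,
    d.toList ≠ [] ∧ d ∈ BY_FIRST.getD d.toList.headI [] := by decide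

lemma bucket_sub (c : Char) (d : String) (hd : d ∈ BY_FIRST.getD c []) :
    d ∈ KERALA_DISTRICTS ∧ d.toList.head? = some c := by
  rw [PySem.Dict.getD_eq_get?_getD] at hd
  cases h : BY_FIRST.get? c with
  | none => rw [h] at hd; cases hd
  | some ds =>
    rw [h] at hd
    exact bucket_items (c, ds) (PySem.Dict.mem_items_of_get?_eq_some _ h) d hd

lemma checkBucket_iff (ds : List String) (l : List Char) :
    checkBucket ds l = true ↔ ∃ d ∈ ds, d.toList <+: l := by
  induction ds with
  | nil => simp [checkBucket]
  | cons d ds ih =>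
    rw [checkBucket]
    split <;> rename_i h
    · simpa using Or.inl ((PySem.Chars.startswith_iff l d.toList).mp h)
    · rw [ih]
      constructor
      · rintro ⟨e, he, hp⟩; exact ⟨e, .tail _ he, hp⟩
      · rintro ⟨e, he, hp⟩
        rcases List.mem_cons.mp he with rfl | he
        · exact absurd ((PySem.Chars.startswith_iff l e.toList).mpr hp) (by simp_all)
        · exact ⟨e, he, hp⟩

lemma scanText_iff (l : List Char) :
    scanText l = true ↔ ∃ d ∈ KERALA_DISTRICTS, ∃ j, d.toList <+: l.drop j := by
  induction l with
  | nil =>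
    simp only [scanText, List.drop_nil, Bool.false_eq_true, false_iff]
    rintro ⟨d, hd, _, hp⟩
    exact (bucket_mem d hd).1 (List.prefix_nil.mp hp)
  | cons c rest ih =>
    rw [scanText]
    split <;> rename_i h
    · simp only [true_iff]
      obtain ⟨d, hd, hp⟩ := (checkBucket_iff _ _).mp h
      exact ⟨d, (bucket_sub c d hd).1, 0, hp⟩
    · rw [ih]
      constructor
      · rintro ⟨d, hd, j, hp⟩; exact ⟨d, hd, j + 1, hp⟩
      · rintro ⟨d, hd, j, hp⟩
        cases j with
        | zero =>
          exfalso
          rw [List.drop_zero] at hp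
          obtain ⟨hne, hmem⟩ := bucket_mem d hd
          obtain ⟨d0, dt, hdt⟩ := List.exists_cons_of_ne_nil hne
          rw [hdt] at hp
          obtain ⟨hc, -⟩ := List.cons_prefix_cons.mp hp
          rw [hdt, List.headI, hc] at hmem
          exact h ((checkBucket_iff _ _).mpr ⟨d, hmem, hdt ▸ hp⟩)
        | succ j => exact ⟨d, hd, j, by simpa using hp⟩

lemma checkDistricts_iff (cu : String) :
    checkDistricts KERALA_DISTRICTS cu = true
      ↔ ∃ d ∈ KERALA_DISTRICTS, ∃ j, d.toList <+: cu.toList.drop j := by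
  have h : ∀ ds : List String, checkDistricts ds cu = true ↔ ∃ d ∈ ds, PySem.Str.isIn d cu := by
    intro ds
    induction ds with
    | nil => simp [checkDistricts]
    | cons d ds ih =>
      rw [checkDistricts]
      split <;> rename_i hh
      · simpa using Or.inl hh
      · rw [ih]
        constructor
        · rintro ⟨e, he, hp⟩; exact ⟨e, .tail _ he, hp⟩
        · rintro ⟨e, he, hp⟩
          rcases List.mem_cons.mp he with rfl | he
          · exact absurd hp (by simp_all)
          · exact ⟨e, he, hp⟩
  rw [h]
  refine exists_congr fun d => and_congr_right fun _ => ?_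
  rw [show PySem.Str.isIn d cu = PySem.Chars.isIn d.toList cu.toList from PySem.Str.isIn_eq d cu]
  exact (PySem.Chars.exists_prefix_drop_iff_isIn d.toList cu.toList).symm

lemma cell_eq (cu : String) :
    checkDistricts KERALA_DISTRICTS cu = scanText cu.toList := by
  apply Bool.eq_iff_iff.mpr
  rw [checkDistricts_iff, scanText_iff]

lemma loops_eq (cs : List (Option String)) : loopCells cs = loopCellsB cs := by
  induction cs with
  | nil => rfl
  | cons c rest ih =>
    cases c with
    | none => simpa [loopCells, loopCellsB] using ih
    | some s =>
      rw [loopCells, loopCellsB, cell_eq]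
      split <;> [skip; exact ih]
      split <;> [rfl; exact ih]

-- ===== VERDICT (by name: the statement is the Claim_ definition above) =====
theorem is_district_row_spec : Claim_equal_is_district_row := by
  intro row _
  unfold Spec_is_district_row is_district_row is_district_row_alt
  split
  · rfl
  · exact loops_eq _
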